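-- pv_equiv track=rewrite | github.com/EvVPEvVP/hexlet-git | Task28.py | Keymaker
-- ===== SOURCE A (Python) =====
-- def Keymaker(k: int) -> str:
--
--     lst = []
--     count = 0
--     result = ''
--
--     for i in range( k +1):
--         lst.append(0)
--
--     for i in range(len(lst ) -1):
--         count += 1
--         for j in range(0 ,len(lst) ,count):
--             if lst[j] == 1:
--                 lst[j] = 0
--             else:
--                 lst[j] = 1
--     resultlst = lst[1:]
--
--     for i in resultlst:
--         result += str(i)
--
--     return result
-- ===== SOURCE B (Python) =====
-- def Keymaker(k: int) -> str:
--     # Mark perfect-square positions directly: only isqrt(k) iterations.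
--     chars = ['0'] * max(k, 0)
--     i = 1
--     while i * i <= k:
--         chars[i * i - 1] = '1'
--         i += 1
--     return ''.join(chars)
-- ===== Notes on version B (the rewrite author's own statement) =====
-- stated objective: faster
-- what changed: Replaces the divisor-toggle simulation (for each count, flip every count-th cell) by directly marking the sqrt(k) perfect-square positions in a '0'-filled list.
import Mathlib
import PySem

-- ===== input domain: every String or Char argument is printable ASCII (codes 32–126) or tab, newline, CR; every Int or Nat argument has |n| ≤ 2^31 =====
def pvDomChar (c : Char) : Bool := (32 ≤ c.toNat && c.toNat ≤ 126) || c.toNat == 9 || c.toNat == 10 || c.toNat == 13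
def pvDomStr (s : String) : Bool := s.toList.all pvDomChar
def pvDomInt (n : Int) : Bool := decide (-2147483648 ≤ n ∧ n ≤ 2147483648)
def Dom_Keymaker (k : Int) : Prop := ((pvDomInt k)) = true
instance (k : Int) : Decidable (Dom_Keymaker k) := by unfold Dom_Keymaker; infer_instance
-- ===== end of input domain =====

-- B marks the perfect-square positions of a '0'-filled list directly (one pass over the square
-- roots) instead of simulating A's divisor-toggle passes; equal return values proved for all k.


-- ===== PORT A =====
-- 'result += str(i)' is accumulated on the List Char side (PySem string convention) and the
-- final str value wrapped once with String.ofList.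
def Keymaker (k : Int) : String :=
  let lst : List Int := (PySem.List.pyRange 0 (k + 1) 1).foldl (fun l _ => l ++ [(0 : Int)]) []
  let st := (PySem.List.pyRange 0 (PySem.List.len lst - 1) 1).foldl
      (fun (st : List Int × Int) _ =>
        let count := st.2 + 1
        let l := (PySem.List.pyRange 0 (PySem.List.len st.1) count).foldl
            (fun l j =>
              if PySem.List.pyGetD l j 0 == 1 then PySem.List.pySetD l j (0 : Int)
              else PySem.List.pySetD l j (1 : Int)) st.1
        (l, count)) (lst, (0 : Int))
  let resultlst := PySem.List.slice st.1 (some 1) none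
  String.ofList (resultlst.foldl (fun r i => r ++ PySem.Int.toChars i) [])

-- ===== PORT B =====
-- the 'while i * i <= k' loop of Source B
def pvMark (k : Int) (i : Nat) (chars : List Char) : List Char :=
  if h : (i : Int) * i ≤ k then
    pvMark k (i + 1) (PySem.List.pySetD chars ((i : Int) * i - 1) '1')
  else chars
termination_by (k + 1 - i).toNat
decreasing_by
  have hi : (i : Int) ≤ (i : Int) * i := by nlinarith [Int.natCast_nonneg i]
  have h2 : (i : Int) ≤ k := le_trans hi h
  omega

-- ['0'] * max(k, 0), the root-marking loop, then ''.join
def Keymaker_alt (k : Int) : String :=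
  String.ofList (pvMark k 1 (List.replicate (max k 0).toNat '0'))

-- ===== PRECONDITION & SPEC =====
def Spec_Keymaker (k : Int) (out : String) : Prop := out = Keymaker_alt k
instance (k : Int) (out : String) : Decidable (Spec_Keymaker k out) := by unfold Spec_Keymaker; infer_instance

-- ===== CLAIM (what is proved, stated in full; the proofs are below) =====
def Claim_equal_Keymaker : Prop := ∀ (k : Int), Dom_Keymaker k → Spec_Keymaker k (Keymaker k)

-- ===== LEMMAS AND PROOFS =====

-- the toggle A applies at a visited cell
def pvTog (x : Int) : Int := if x == 1 then 0 else 1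

-- number of divisors of p among 1..m
def pvDcnt (m p : Nat) : Nat := ((List.range' 1 m).filter (fun c => decide (c ∣ p))).length

-- a fold of in-place updates at distinct in-range indices, pointwise
lemma foldl_setf_getD (f : Int → Int) :
    ∀ (ids : List Int) (l : List Int), ids.Nodup →
      (∀ j ∈ ids, 0 ≤ j ∧ j < (l.length : Int)) →
      ((ids.foldl (fun l j => PySem.List.pySetD l j (f (PySem.List.pyGetD l j 0))) l).length = l.length ∧
       ∀ p : Nat,
         (ids.foldl (fun l j => PySem.List.pySetD l j (f (PySem.List.pyGetD l j 0))) l).getD p 0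
           = if (p : Int) ∈ ids then f (l.getD p 0) else l.getD p 0) := by
  intro ids
  induction ids with
  | nil => intro l _ _; simp
  | cons j ids ih =>
    intro l hnd hin
    have hj := hin j (by simp)
    have hjlen : j.toNat < l.length := by omega
    have hset : PySem.List.pySetD l j (f (PySem.List.pyGetD l j 0))
        = l.set j.toNat (f (l.getD j.toNat 0)) := by
      rw [PySem.List.pySetD_of_nonneg _ _ hj.1]
      congr 1
      rw [PySem.List.pyGetD_eq_getElem _ _ hj.1 (by simpa using hj.2)]
      rw [List.getD_eq_getElem _ _ hjlen]
    have hlen1 : (PySem.List.pySetD l j (f (PySem.List.pyGetD l j 0))).length = l.length :=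
      PySem.List.length_pySetD _ _ _
    obtain ⟨ihlen, ihget⟩ := ih (PySem.List.pySetD l j (f (PySem.List.pyGetD l j 0))) hnd.of_cons
      (by intro x hx; rw [hlen1]; exact hin x (by simp [hx]))
    constructor
    · simpa [List.foldl_cons, hlen1] using ihlen
    · intro p
      rw [List.foldl_cons, ihget p, hset]
      by_cases hpj : (p : Int) = j
      · have hpn : p = j.toNat := by omega
        have hpnot : (p : Int) ∉ ids := by rw [hpj]; exact (List.nodup_cons.mp hnd).1
        rw [if_neg hpnot, if_pos (by simp [hpj])]
        subst hpn
        rw [List.getD_eq_getElem _ _ (by simpa using hjlen)]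
        simp
      · have hne : (l.set j.toNat (f (l.getD j.toNat 0))).getD p 0 = l.getD p 0 := by
          by_cases hp : p < l.length
          · rw [List.getD_eq_getElem _ _ (by simpa using hp), List.getD_eq_getElem _ _ hp]
            rw [List.getElem_set_ne (by omega)]
          · rw [List.getD_eq_default _ _ (by simpa using hp), List.getD_eq_default _ _ (by omega)]
        rw [hne]
        by_cases hmem : (p : Int) ∈ ids <;> simp [hmem, hpj]

-- the inner pass: position p is toggled iff count divides p
lemma inner_pass (c : Int) (hc : 1 ≤ c) (l : List Int) :
    (((PySem.List.pyRange 0 (PySem.List.len l) c).foldl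
        (fun l j =>
          if PySem.List.pyGetD l j 0 == 1 then PySem.List.pySetD l j (0 : Int)
          else PySem.List.pySetD l j (1 : Int)) l).length = l.length ∧
     ∀ p : Nat, p < l.length →
       ((PySem.List.pyRange 0 (PySem.List.len l) c).foldl
        (fun l j =>
          if PySem.List.pyGetD l j 0 == 1 then PySem.List.pySetD l j (0 : Int)
          else PySem.List.pySetD l j (1 : Int)) l).getD p 0
         = if c ∣ (p : Int) then pvTog (l.getD p 0) else l.getD p 0) := by
  have hcpos : (0:Int) < c := by omega
  have hfun : (fun (l : List Int) (j : Int) =>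
      if PySem.List.pyGetD l j 0 == 1 then PySem.List.pySetD l j (0 : Int)
      else PySem.List.pySetD l j (1 : Int))
      = (fun l j => PySem.List.pySetD l j (pvTog (PySem.List.pyGetD l j 0))) := by
    funext l j; unfold pvTog; split <;> rfl
  rw [hfun]
  have hnd : (PySem.List.pyRange 0 (PySem.List.len l) c).Nodup := by
    rw [PySem.List.pyRange_of_pos _ _ hcpos]
    refine List.Nodup.map ?_ (List.nodup_range)
    intro a b hab
    simp only [zero_add] at hab
    have : (a : Int) = b := mul_left_cancel₀ (by omega) hab
    omega
  have hin : ∀ j ∈ PySem.List.pyRange 0 (PySem.List.len l) c, 0 ≤ j ∧ j < (l.length : Int) := by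
    intro j hj
    rw [PySem.List.mem_pyRange_iff_of_pos hcpos] at hj
    simpa using ⟨hj.1, hj.2.1⟩
  obtain ⟨h1, h2⟩ := foldl_setf_getD pvTog _ l hnd hin
  refine ⟨h1, fun p hp => ?_⟩
  rw [h2 p]
  by_cases hd : c ∣ (p : Int)
  · rw [if_pos ((PySem.List.mem_pyRange_iff_of_pos hcpos _).mpr
      (by simp only [PySem.List.len_eq, Int.sub_zero]; exact ⟨by omega, by omega, hd⟩)), if_pos hd]
  · rw [if_neg (fun hmem => hd (by
      have := (PySem.List.mem_pyRange_iff_of_pos hcpos _).mp hmem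
      simpa using this.2.2)), if_neg hd]

lemma pvDcnt_succ (m p : Nat) :
    pvDcnt (m + 1) p = pvDcnt m p + (if (m + 1) ∣ p then 1 else 0) := by
  unfold pvDcnt
  rw [List.range'_1_concat, List.filter_append, List.length_append]
  congr 1
  by_cases h : (m + 1) ∣ p <;> simp [Nat.add_comm 1 m, h]

-- the outer loop invariant: after m passes, cell p holds the parity of pvDcnt m p
lemma outer_inv (n : Nat) (m : Nat) :
    (((PySem.List.pyRange 0 (m : Int) 1).foldl
        (fun (st : List Int × Int) _ =>
          let count := st.2 + 1
          let l := (PySem.List.pyRange 0 (PySem.List.len st.1) count).foldl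
              (fun l j =>
                if PySem.List.pyGetD l j 0 == 1 then PySem.List.pySetD l j (0 : Int)
                else PySem.List.pySetD l j (1 : Int)) st.1
          (l, count)) (List.replicate n (0 : Int), (0 : Int))).2 = (m : Int)) ∧
    (((PySem.List.pyRange 0 (m : Int) 1).foldl
        (fun (st : List Int × Int) _ =>
          let count := st.2 + 1
          let l := (PySem.List.pyRange 0 (PySem.List.len st.1) count).foldl
              (fun l j =>
                if PySem.List.pyGetD l j 0 == 1 then PySem.List.pySetD l j (0 : Int)
                else PySem.List.pySetD l j (1 : Int)) st.1
          (l, count)) (List.replicate n (0 : Int), (0 : Int))).1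
      = (List.range n).map (fun p => if pvDcnt m p % 2 = 1 then (1 : Int) else 0)) := by
  induction m with
  | zero =>
    rw [PySem.List.pyRange_one_eq_nil (by omega)]
    constructor
    · rfl
    · simp [pvDcnt, List.map_const']
  | succ m ih =>
    obtain ⟨ih2, ih1⟩ := ih
    have hr : PySem.List.pyRange 0 ((m : Int) + 1) 1 = PySem.List.pyRange 0 (m : Int) 1 ++ [(m : Int)] :=
      PySem.List.pyRange_one_succ_right (by omega)
    push_cast
    rw [hr, List.foldl_append]
    set st := ((PySem.List.pyRange 0 (m : Int) 1).foldl
        (fun (st : List Int × Int) _ =>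
          let count := st.2 + 1
          let l := (PySem.List.pyRange 0 (PySem.List.len st.1) count).foldl
              (fun l j =>
                if PySem.List.pyGetD l j 0 == 1 then PySem.List.pySetD l j (0 : Int)
                else PySem.List.pySetD l j (1 : Int)) st.1
          (l, count)) (List.replicate n (0 : Int), (0 : Int))) with hst
    have hLlen : st.1.length = n := by rw [ih1]; simp
    obtain ⟨hil, hig⟩ := inner_pass (st.2 + 1) (by rw [ih2]; omega) st.1
    simp only [List.foldl_cons, List.foldl_nil]
    simp only [PySem.List.len_eq, hLlen] at hil hig ⊢
    refine ⟨by rw [ih2], ?_⟩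
    apply List.ext_getElem
    · rw [hil]; simp
    · intro q hq1 hq2
      have hqn : q < n := by rwa [hil] at hq1
      rw [← List.getD_eq_getElem _ 0 hq1, ← List.getD_eq_getElem _ 0 hq2]
      rw [hig q (by omega), ih2, ih1]
      rw [PySem.List.getD_map_range _ _ _ _ hqn, PySem.List.getD_map_range _ _ _ _ hqn]
      have hdvd : ((m : Int) + 1) ∣ (q : Int) ↔ (m + 1) ∣ q := by
        constructor
        · intro h; exact_mod_cast (by exact_mod_cast h : ((m+1 : Nat) : Int) ∣ (q:Int))
        · intro h; exact_mod_cast Int.natCast_dvd_natCast.mpr h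
      rw [pvDcnt_succ]
      by_cases hd : (m + 1) ∣ q
      · rw [if_pos (hdvd.mpr hd), if_pos hd]
        by_cases hpar : pvDcnt m q % 2 = 1
        · rw [if_pos hpar, if_neg (by omega)]; rfl
        · rw [if_neg hpar, if_pos (by omega)]; rfl
      · rw [if_neg (fun h => hd (hdvd.mp h)), if_neg hd]
        simp

-- a positive number has an odd number of divisors iff it is a perfect square
lemma odd_card_divisors_iff (p : ℕ) (hp : p ≠ 0) :
    (Nat.divisors p).card % 2 = 1 ↔ IsSquare p := by
  classical
  have hmem : ∀ d, d ∈ p.divisors ↔ d ∣ p := by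
    intro d; rw [Nat.mem_divisors]; exact ⟨fun h => h.1, fun h => ⟨h, hp⟩⟩
  have hdisj1 : Disjoint (p.divisors.filter (fun d => d * d < p))
      (p.divisors.filter (fun d => d * d = p)) := by
    rw [Finset.disjoint_left]; intro a ha hb
    rw [Finset.mem_filter] at ha hb; omega
  have hdisj2 : Disjoint (p.divisors.filter (fun d => d * d < p) ∪
      p.divisors.filter (fun d => d * d = p)) (p.divisors.filter (fun d => p < d * d)) := by
    rw [Finset.disjoint_left]; intro a ha hb
    rw [Finset.mem_union, Finset.mem_filter, Finset.mem_filter] at ha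
    rw [Finset.mem_filter] at hb
    rcases ha with h | h <;> omega
  have hunion : p.divisors.filter (fun d => d * d < p) ∪ p.divisors.filter (fun d => d * d = p)
      ∪ p.divisors.filter (fun d => p < d * d) = p.divisors := by
    ext d
    rw [Finset.mem_union, Finset.mem_union, Finset.mem_filter, Finset.mem_filter,
      Finset.mem_filter]
    constructor
    · rintro ((h | h) | h) <;> exact h.1
    · intro h
      rcases lt_trichotomy (d * d) p with hlt | heq | hgt
      · exact Or.inl (Or.inl ⟨h, hlt⟩)
      · exact Or.inl (Or.inr ⟨h, heq⟩)
      · exact Or.inr ⟨h, hgt⟩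
  have hcard : p.divisors.card = (p.divisors.filter (fun d => d * d < p)).card
      + (p.divisors.filter (fun d => d * d = p)).card
      + (p.divisors.filter (fun d => p < d * d)).card := by
    rw [← Finset.card_union_of_disjoint hdisj1, ← Finset.card_union_of_disjoint hdisj2, hunion]
  have hLG : (p.divisors.filter (fun d => d * d < p)).card
      = (p.divisors.filter (fun d => p < d * d)).card := by
    apply Finset.card_nbij (fun d => p / d)
    · intro d hd
      rw [Finset.mem_coe, Finset.mem_filter, hmem] at hd
      obtain ⟨hdvd, hlt⟩ := hd
      have hd0 : 0 < d := Nat.pos_of_dvd_of_pos hdvd (Nat.pos_of_ne_zero hp)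
      obtain ⟨q, hq⟩ := hdvd
      have hq' : p / d = q := by rw [hq]; exact Nat.mul_div_cancel_left q hd0
      have hq0 : 0 < q := by nlinarith
      have hdq : d < q := by nlinarith
      refine Finset.mem_coe.mpr ?_
      rw [Finset.mem_filter, hmem]
      beta_reduce
      rw [hq']
      exact ⟨⟨d, by rw [hq, Nat.mul_comm]⟩, by nlinarith⟩
    · intro d1 h1 d2 h2 heq
      rw [Finset.mem_coe, Finset.mem_filter, hmem] at h1 h2
      have heq' : p / d1 = p / d2 := heq
      have e1 := Nat.div_div_self h1.1 hp
      rw [heq', Nat.div_div_self h2.1 hp] at e1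
      exact e1.symm
    · intro q hq
      rw [Finset.mem_coe, Finset.mem_filter, hmem] at hq
      obtain ⟨hdvd, hgt⟩ := hq
      have hq0 : 0 < q := Nat.pos_of_dvd_of_pos hdvd (Nat.pos_of_ne_zero hp)
      obtain ⟨r, hr⟩ := hdvd
      have hr' : p / q = r := by rw [hr]; exact Nat.mul_div_cancel_left r hq0
      have hr0 : 0 < r := by
        rcases Nat.eq_zero_or_pos r with h | h
        · exfalso; apply hp; rw [hr, h, Nat.mul_zero]
        · exact h
      have hrq : r < q := by nlinarith
      refine ⟨p / q, ?_, Nat.div_div_self ⟨r, hr⟩ hp⟩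
      refine Finset.mem_coe.mpr ?_
      rw [Finset.mem_filter, hmem]
      rw [hr']
      exact ⟨⟨q, by rw [hr, Nat.mul_comm]⟩, by nlinarith⟩
  have hEcard : (p.divisors.filter (fun d => d * d = p)).card
      = if IsSquare p then 1 else 0 := by
    split
    · rename_i hsq
      obtain ⟨r, hr⟩ := hsq
      have : p.divisors.filter (fun d => d * d = p) = {r} := by
        ext d
        rw [Finset.mem_filter, hmem, Finset.mem_singleton]
        constructor
        · rintro ⟨-, h⟩
          have : d * d = r * r := by rw [h, hr]
          exact Nat.mul_self_inj.mp this
        · intro hd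
          exact ⟨by rw [hd]; exact ⟨r, hr⟩, by rw [hd]; exact hr.symm⟩
      rw [this, Finset.card_singleton]
    · rename_i hsq
      rw [Finset.card_eq_zero]
      ext d
      simp only [Finset.mem_filter, Finset.notMem_empty, iff_false, not_and]
      intro _ h
      exact hsq ⟨d, h.symm⟩
  rw [hcard, hLG, hEcard]
  by_cases hsq : IsSquare p <;> simp [hsq] <;> omega

lemma pvDcnt_parity (m p : Nat) (h1 : 1 ≤ p) (h2 : p ≤ m) :
    (pvDcnt m p % 2 = 1) ↔ Nat.sqrt p * Nat.sqrt p = p := by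
  have hcnt : pvDcnt m p = (Nat.divisors p).card := by
    have hdiv : (Nat.divisors p).card = ((List.range' 1 p).filter (fun c => decide (c ∣ p))).length := by
      rw [Nat.divisors, Nat.Ico_eq_range']
      simp [Finset.filter, Finset.card, Multiset.filter_coe]
    rw [hdiv]
    unfold pvDcnt
    obtain ⟨t, ht⟩ : ∃ t, m = p + t := ⟨m - p, by omega⟩
    subst ht
    rw [← List.range'_append (s := 1) (m := p) (n := t) (step := 1), List.filter_append,
      List.length_append]
    have : (List.range' (1 + 1 * p) t 1).filter (fun c => decide (c ∣ p)) = [] := by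
      rw [List.filter_eq_nil_iff]
      intro c hc
      rw [List.mem_range'_1] at hc
      simp only [decide_eq_true_eq]
      intro hdvd
      have := Nat.le_of_dvd (by omega) hdvd
      omega
    rw [this, List.length_nil]
    omega
  rw [hcnt, odd_card_divisors_iff p (by omega), ← Nat.exists_mul_self p]
  constructor
  · rintro ⟨r, hr⟩; exact ⟨r, hr.symm⟩
  · rintro ⟨r, hr⟩; exact ⟨r, hr.symm⟩

lemma mark_length (k : Int) : ∀ (i : Nat) (l : List Char), (pvMark k i l).length = l.length := by
  intro i l
  fun_induction pvMark with
  | case1 i l h ih => rw [ih, PySem.List.length_pySetD]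
  | case2 i l h => rfl

-- B's loop, pointwise: cell p becomes '1' iff p+1 is a square with root ≥ i
lemma mark_getD (k : Int) :
    ∀ (i : Nat) (l : List Char), l.length = k.toNat → 1 ≤ i →
      ∀ p : Nat, p < k.toNat →
        (pvMark k i l).getD p '0'
          = if Nat.sqrt (p + 1) * Nat.sqrt (p + 1) = p + 1 ∧ i ≤ Nat.sqrt (p + 1) then '1'
            else l.getD p '0' := by
  intro i l
  fun_induction pvMark with
  | case1 i l h ih =>
    intro hlen hi p hp
    have hii : 1 ≤ i * i := Nat.one_le_iff_ne_zero.mpr (by positivity)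
    have hcast : ((i : Int)) * i - 1 = ((i * i - 1 : Nat) : Int) := by push_cast [hii]; ring
    have hik : ((i : Int)) * i ≤ k := h
    have hmlt : i * i - 1 < k.toNat := by omega
    have hset : PySem.List.pySetD l ((i : Int) * i - 1) '1' = l.set (i * i - 1) '1' := by
      rw [hcast, PySem.List.pySetD_of_nonneg _ _ (Int.natCast_nonneg _)]
      simp
    have hlen' : (PySem.List.pySetD l ((i : Int) * i - 1) '1').length = k.toNat := by
      rw [PySem.List.length_pySetD]; exact hlen
    rw [ih hlen' (by omega) p hp]
    have hsqi : Nat.sqrt (i * i) = i := by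
      rw [show i * i = i ^ 2 by ring]; exact Nat.sqrt_eq' i
    by_cases hsq : Nat.sqrt (p + 1) * Nat.sqrt (p + 1) = p + 1
    · by_cases hle1 : i + 1 ≤ Nat.sqrt (p + 1)
      · rw [if_pos ⟨hsq, hle1⟩, if_pos ⟨hsq, by omega⟩]
      · by_cases hle0 : i ≤ Nat.sqrt (p + 1)
        · -- sqrt (p+1) = i, the cell just set
          have hsi : Nat.sqrt (p + 1) = i := by omega
          have hpm : p = i * i - 1 := by rw [hsi] at hsq; omega
          rw [if_neg (by rintro ⟨-, hc⟩; omega), if_pos ⟨hsq, hle0⟩, hset, ← hpm]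
          rw [List.getD_eq_getElem _ _ (by rw [List.length_set]; omega)]
          simp [hpm]
        · -- p is not a square position with root ≥ i: cell p untouched
          have hne : p ≠ i * i - 1 := by
            intro hpm
            have hpp : p + 1 = i * i := by omega
            have hs : Nat.sqrt (p + 1) = i := by rw [hpp, hsqi]
            omega
          rw [if_neg (by rintro ⟨-, hc⟩; omega), if_neg (by rintro ⟨-, hc⟩; omega), hset]
          rw [List.getD_eq_getElem _ _ (by rw [List.length_set]; omega),
            List.getD_eq_getElem _ _ (by omega)]
          rw [List.getElem_set_ne (by omega)]
    · have hne : p ≠ i * i - 1 := by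
        intro hpm
        have hpp : p + 1 = i * i := by omega
        exact hsq (by rw [hpp, hsqi])
      rw [if_neg (by rintro ⟨hc, -⟩; exact hsq hc), if_neg (by rintro ⟨hc, -⟩; exact hsq hc), hset]
      rw [List.getD_eq_getElem _ _ (by rw [List.length_set]; omega),
        List.getD_eq_getElem _ _ (by omega)]
      rw [List.getElem_set_ne (by omega)]
  | case2 i l h =>
    intro hlen hi p hp
    rw [if_neg]
    rintro ⟨hsq, hle⟩
    have hk0 : (0:Int) < k := by omega
    have hpk : ((p:Int) + 1) ≤ k := by omega
    set s := Nat.sqrt (p + 1) with hs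
    have hss : ((s:Int)) * s = (p:Int) + 1 := by exact_mod_cast congrArg (Nat.cast (R := Int)) hsq
    have : ((i:Int)) * i ≤ (s:Int) * s := by
      have : (i:Int) ≤ s := by exact_mod_cast hle
      nlinarith [Int.natCast_nonneg i]
    omega

-- A with its first loop evaluated to the '0'-filled list
lemma keymakerA_eq (k : Int) :
    Keymaker k = String.ofList
      ((PySem.List.slice
        (((PySem.List.pyRange 0 ((((k+1).toNat : Int)) - 1) 1).foldl
          (fun (st : List Int × Int) _ =>
            let count := st.2 + 1
            let l := (PySem.List.pyRange 0 (PySem.List.len st.1) count).foldl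
                (fun l j => if PySem.List.pyGetD l j 0 == 1 then PySem.List.pySetD l j (0:Int)
                 else PySem.List.pySetD l j (1:Int)) st.1
            (l, count)) (List.replicate (k+1).toNat (0:Int), (0:Int))).1)
        (some 1) none).foldl (fun r i => r ++ PySem.Int.toChars i) []) := by
  unfold Keymaker
  have hlst : (PySem.List.pyRange 0 (k+1) 1).foldl (fun l (_ : Int) => l ++ [(0:Int)]) []
      = List.replicate (k+1).toNat (0:Int) := by
    rw [PySem.List.foldl_append_singleton_eq_map (fun _ => (0:Int))]
    simp [List.map_const', PySem.List.length_pyRange_one]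
  simp only [hlst, PySem.List.len_eq, List.length_replicate]

-- 'result += str(i)' over a 0/1 list is a character map
lemma foldl_digits (xs : List Int) (hx : ∀ x ∈ xs, x = 0 ∨ x = 1) (acc : List Char) :
    xs.foldl (fun r i => r ++ PySem.Int.toChars i) acc
      = acc ++ xs.map (fun x => if x = 1 then '1' else '0') := by
  induction xs generalizing acc with
  | nil => simp
  | cons x xs ih =>
    rw [List.foldl_cons, ih (fun y hy => hx y (by simp [hy])), List.map_cons]
    rcases hx x (by simp) with h | h <;> subst h <;> simp <;> rfl

-- B's list in map form
lemma markB_eq (k : Int) :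
    pvMark k 1 (List.replicate (max k 0).toNat '0')
      = (List.range k.toNat).map
          (fun q => if Nat.sqrt (q + 1) * Nat.sqrt (q + 1) = q + 1 then '1' else '0') := by
  have hmax : (max k 0).toNat = k.toNat := by omega
  rw [hmax]
  apply List.ext_getElem
  · rw [mark_length, List.length_replicate, List.length_map, List.length_range]
  · intro q hq1 hq2
    have hqk : q < k.toNat := by
      rw [mark_length, List.length_replicate] at hq1; exact hq1
    rw [← List.getD_eq_getElem _ '0' hq1, ← List.getD_eq_getElem _ '0' hq2]
    rw [mark_getD k 1 _ (by rw [List.length_replicate]) (le_refl 1) q hqk]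
    rw [PySem.List.getD_map_range _ _ _ _ hqk]
    have h1s : Nat.sqrt (q + 1) * Nat.sqrt (q + 1) = q + 1 → 1 ≤ Nat.sqrt (q + 1) := by
      intro h
      rcases Nat.eq_zero_or_pos (Nat.sqrt (q + 1)) with h0 | h0
      · rw [h0] at h; omega
      · exact h0
    by_cases hsq : Nat.sqrt (q + 1) * Nat.sqrt (q + 1) = q + 1
    · rw [if_pos ⟨hsq, h1s hsq⟩, if_pos hsq]
    · rw [if_neg (by rintro ⟨hc, -⟩; exact hsq hc), if_neg hsq]
      rw [List.getD_eq_getElem _ _ (by rw [List.length_replicate]; exact hqk)]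
      simp

-- ===== VERDICT (by name: the statement is the Claim_ definition above) =====
theorem Keymaker_spec : Claim_equal_Keymaker := by
  unfold Claim_equal_Keymaker Spec_Keymaker
  intro k _
  rw [keymakerA_eq]
  unfold Keymaker_alt
  rw [markB_eq]
  by_cases hk : k ≤ 0
  · -- degenerate: both strings empty
    have hk0 : k.toNat = 0 := by omega
    have hn1 : ((((k+1).toNat : Nat) : Int)) - 1 ≤ 0 := by omega
    rw [PySem.List.pyRange_one_eq_nil hn1, List.foldl_nil]
    rw [hk0, List.range_zero, List.map_nil]
    have : (k+1).toNat ≤ 1 := by omega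
    interval_cases h : (k+1).toNat <;> simp [PySem.List.slice_from_one]
  · -- main case: k ≥ 1
    have hk1 : 1 ≤ k := by omega
    have hn : (k+1).toNat = k.toNat + 1 := by omega
    have hb : (((k+1).toNat : Int)) - 1 = ((k.toNat : Nat) : Int) := by omega
    rw [hb, hn]
    obtain ⟨-, h1⟩ := outer_inv (k.toNat + 1) k.toNat
    rw [h1]
    rw [PySem.List.slice_from_one]
    rw [List.range_succ_eq_map, List.map_cons, List.tail_cons, List.map_map]
    rw [foldl_digits _ (by
      intro x hx
      rw [List.mem_map] at hx
      obtain ⟨q, -, hq⟩ := hx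
      by_cases hpar : pvDcnt k.toNat (q+1) % 2 = 1 <;> simp [Function.comp, hpar] at hq <;> omega)]
    rw [List.nil_append, List.map_map]
    apply congrArg String.ofList
    apply List.map_congr_left
    intro q hq
    rw [List.mem_range] at hq
    have := pvDcnt_parity k.toNat (q + 1) (by omega) (by omega)
    by_cases hpar : pvDcnt k.toNat (q+1) % 2 = 1
    · simp [Function.comp, hpar, this.mp hpar]
    · have hns : ¬ Nat.sqrt (q + 1) * Nat.sqrt (q + 1) = q + 1 := fun h => hpar (this.mpr h)
      simp [Function.comp, hpar, hns]
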